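-- pv_equiv track=rewrite | github.com/loghithakshan/INBLOODO-AGENT26 | src/agent/agent_orchestrator.py | _sort_risks
-- ===== SOURCE A (Python) =====
-- from typing import Dict, List, Any, Optional
--
-- def _sort_risks(risks: List[str]) -> List[str]:
--     """Sort risks by severity level."""
--     if not risks:
--         return []
--
--     def risk_score(text: str) -> tuple:
--         text_lower = text.lower()
--         # Return (severity_level, text) for sorting
--         if any(w in text_lower for w in ["critical", "severe", "immediate"]):
--             return (0, text)
--         elif any(w in text_lower for w in ["high", "significant"]):
--             return (1, text)
--         elif any(w in text_lower for w in ["moderate", "medium"]):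
--             return (2, text)
--         elif any(w in text_lower for w in ["low", "minor"]):
--             return (3, text)
--         else:
--             return (4, text)
--
--     return sorted(risks, key=risk_score)
-- ===== SOURCE B (Python) =====
-- def _sort_risks(risks):
--     """Bucket risks by severity level, then sort each bucket by text and concatenate."""
--     if not risks:
--         return []
--
--     table = (("critical", "severe", "immediate"),
--              ("high", "significant"),
--              ("moderate", "medium"),
--              ("low", "minor"))
--
--     def severity(text):
--         t = text.lower()
--         for level, words in enumerate(table):
--             if any(w in t for w in words):
--                 return level
--         return 4
--
--     buckets = [[], [], [], [], []]
--     for r in risks: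
--         buckets[severity(r)].append(r)
--
--     out = []
--     for b in buckets:
--         out.extend(sorted(b))
--     return out
-- ===== Notes on version B (the rewrite author's own statement) =====
-- stated objective: alternative
-- what changed: Replaces A's single keyed sort with a (severity, text) tuple key by a one-pass distribution of the risks into five severity buckets followed by a plain text sort of each bucket and concatenation in severity order.
import Mathlib
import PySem

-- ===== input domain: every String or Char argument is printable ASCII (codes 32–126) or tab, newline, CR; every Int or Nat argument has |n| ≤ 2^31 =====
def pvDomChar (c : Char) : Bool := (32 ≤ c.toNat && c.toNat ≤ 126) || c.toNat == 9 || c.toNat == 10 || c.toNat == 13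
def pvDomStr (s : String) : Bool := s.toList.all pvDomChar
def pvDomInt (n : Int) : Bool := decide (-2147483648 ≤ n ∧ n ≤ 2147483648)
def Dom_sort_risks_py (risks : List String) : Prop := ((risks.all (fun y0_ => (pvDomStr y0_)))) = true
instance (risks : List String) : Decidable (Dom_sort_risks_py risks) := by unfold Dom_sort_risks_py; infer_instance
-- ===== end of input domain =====

-- B buckets the risks by severity in one pass, sorts each bucket by text and concatenates,
-- instead of A's single keyed sort with a tuple key (objective: alternative decomposition, same result).

-- ===== PORT A =====
-- A's inner helper risk_score returns the tuple (level, text); ported as the two key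
-- functions riskLevelA / identity fed to PySem.List.sorted2 (the tuple-key sorted).
def riskLevelA (text : String) : Int :=
  let text_lower := PySem.Str.lower text
  if (["critical", "severe", "immediate"].any (fun w => PySem.Str.isIn w text_lower)) then 0
  else if (["high", "significant"].any (fun w => PySem.Str.isIn w text_lower)) then 1
  else if (["moderate", "medium"].any (fun w => PySem.Str.isIn w text_lower)) then 2
  else if (["low", "minor"].any (fun w => PySem.Str.isIn w text_lower)) then 3
  else 4

def sort_risks_py (risks : List String) : List String :=
  if risks = [] then []
  else PySem.List.sorted2 risks riskLevelA (fun t => t)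

-- ===== PORT B =====
-- B's keyword table and its severity helper (a scan over the enumerated table).
def sevTable : List (List String) :=
  [["critical", "severe", "immediate"], ["high", "significant"],
   ["moderate", "medium"], ["low", "minor"]]

def severityB (text : String) : Int :=
  let t := PySem.Str.lower text
  match (PySem.List.enumerate sevTable).find? (fun p => p.2.any (fun w => PySem.Str.isIn w t)) with
  | some p => p.1
  | none => 4

-- buckets[severity(r)].append(r): five accumulators, the index selected by an if-chain.
def sort_risks_py_alt (risks : List String) : List String :=
  if risks = [] then []
  else
    let bk := risks.foldl
      (fun (acc : List String × List String × List String × List String × List String) r =>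
        let s := severityB r
        if s = 0 then (acc.1 ++ [r], acc.2.1, acc.2.2.1, acc.2.2.2.1, acc.2.2.2.2)
        else if s = 1 then (acc.1, acc.2.1 ++ [r], acc.2.2.1, acc.2.2.2.1, acc.2.2.2.2)
        else if s = 2 then (acc.1, acc.2.1, acc.2.2.1 ++ [r], acc.2.2.2.1, acc.2.2.2.2)
        else if s = 3 then (acc.1, acc.2.1, acc.2.2.1, acc.2.2.2.1 ++ [r], acc.2.2.2.2)
        else (acc.1, acc.2.1, acc.2.2.1, acc.2.2.2.1, acc.2.2.2.2 ++ [r]))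
      ([], [], [], [], [])
    PySem.List.sorted bk.1 (fun x => x) ++ PySem.List.sorted bk.2.1 (fun x => x) ++
    PySem.List.sorted bk.2.2.1 (fun x => x) ++ PySem.List.sorted bk.2.2.2.1 (fun x => x) ++
    PySem.List.sorted bk.2.2.2.2 (fun x => x)

-- ===== PRECONDITION & SPEC =====
def Spec_sort_risks_py (risks : List String) (out : List String) : Prop := out = sort_risks_py_alt risks
instance (risks : List String) (out : List String) : Decidable (Spec_sort_risks_py risks out) := by unfold Spec_sort_risks_py; infer_instance

-- ===== CLAIM (what is proved, stated in full; the proofs are below) =====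
def Claim_equal_sort_risks_py : Prop := ∀ (risks : List String), Dom_sort_risks_py risks → Spec_sort_risks_py risks (sort_risks_py risks)

-- ===== LEMMAS AND PROOFS =====

lemma riskLevelA_cases (t : String) :
    riskLevelA t = 0 ∨ riskLevelA t = 1 ∨ riskLevelA t = 2 ∨ riskLevelA t = 3 ∨ riskLevelA t = 4 := by
  unfold riskLevelA
  dsimp only
  split_ifs <;> simp

lemma severityB_eq (t : String) : severityB t = riskLevelA t := by
  unfold severityB riskLevelA sevTable
  dsimp only
  simp only [PySem.List.enumerate, List.find?_cons, List.any_cons, List.any_nil,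
    Bool.or_false, List.find?_nil]
  generalize PySem.Str.isIn "critical" (PySem.Str.lower t) = b0
  generalize PySem.Str.isIn "severe" (PySem.Str.lower t) = b1
  generalize PySem.Str.isIn "immediate" (PySem.Str.lower t) = b2
  generalize PySem.Str.isIn "high" (PySem.Str.lower t) = b3
  generalize PySem.Str.isIn "significant" (PySem.Str.lower t) = b4
  generalize PySem.Str.isIn "moderate" (PySem.Str.lower t) = b5
  generalize PySem.Str.isIn "medium" (PySem.Str.lower t) = b6
  generalize PySem.Str.isIn "low" (PySem.Str.lower t) = b7
  generalize PySem.Str.isIn "minor" (PySem.Str.lower t) = b8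
  revert b0 b1 b2 b3 b4 b5 b6 b7 b8
  decide

-- the combined sort key: severity digit in front of the text's characters
def encKey (t : String) : List Char :=
  Char.ofNat (48 + (riskLevelA t).toNat) :: t.toList

lemma encKey_inj : Function.Injective encKey := by
  intro a b h
  unfold encKey at h
  exact String.toList_inj.mp (List.cons.injEq _ _ _ _ ▸ h).2

lemma before_eq (a b : String) :
    (decide (riskLevelA a < riskLevelA b) ||
      (!decide (riskLevelA b < riskLevelA a) && decide (a < b))) =
    decide (encKey a < encKey b) := by
  unfold encKey
  rcases riskLevelA_cases a with ha | ha | ha | ha | ha <;>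
    rcases riskLevelA_cases b with hb | hb | hb | hb | hb <;>
      simp [ha, hb, List.cons_lt_cons_iff, ← String.lt_iff_toList_lt]

lemma sorted2_eq_sorted_encKey (risks : List String) :
    PySem.List.sorted2 risks riskLevelA (fun t => t) = PySem.List.sorted risks encKey := by
  have h : (fun (a b : String) =>
      decide (riskLevelA a < riskLevelA b) ||
        (!decide (riskLevelA b < riskLevelA a) && decide (a < b))) =
      (fun a b => decide (encKey a < encKey b)) :=
    funext fun a => funext fun b => before_eq a b
  unfold PySem.List.sorted2 PySem.List.sorted
  simp only [Bool.false_eq_true, if_false]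
  rw [h]

-- the fold builds the five severity filters
lemma fold_buckets (risks : List String)
    (a0 a1 a2 a3 a4 : List String) :
    risks.foldl
      (fun (acc : List String × List String × List String × List String × List String) r =>
        let s := severityB r
        if s = 0 then (acc.1 ++ [r], acc.2.1, acc.2.2.1, acc.2.2.2.1, acc.2.2.2.2)
        else if s = 1 then (acc.1, acc.2.1 ++ [r], acc.2.2.1, acc.2.2.2.1, acc.2.2.2.2)
        else if s = 2 then (acc.1, acc.2.1, acc.2.2.1 ++ [r], acc.2.2.2.1, acc.2.2.2.2)
        else if s = 3 then (acc.1, acc.2.1, acc.2.2.1, acc.2.2.2.1 ++ [r], acc.2.2.2.2)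
        else (acc.1, acc.2.1, acc.2.2.1, acc.2.2.2.1, acc.2.2.2.2 ++ [r]))
      (a0, a1, a2, a3, a4) =
    (a0 ++ risks.filter (fun r => riskLevelA r = 0),
     a1 ++ risks.filter (fun r => riskLevelA r = 1),
     a2 ++ risks.filter (fun r => riskLevelA r = 2),
     a3 ++ risks.filter (fun r => riskLevelA r = 3),
     a4 ++ risks.filter (fun r => riskLevelA r = 4)) := by
  induction risks generalizing a0 a1 a2 a3 a4 with
  | nil => simp
  | cons r rs ih =>
    have hs := severityB_eq r
    rcases riskLevelA_cases r with h | h | h | h | h <;> rw [h] at hs <;>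
      simp only [List.foldl_cons, hs, reduceIte] <;>
      rw [ih] <;>
      simp [h, List.append_assoc]

def lvlFilter (risks : List String) (i : Int) : List String :=
  risks.filter (fun r => riskLevelA r = i)

lemma mem_lvlFilter {risks : List String} {i : Int} {r : String}
    (h : r ∈ lvlFilter risks i) : riskLevelA r = i := by
  unfold lvlFilter at h
  simpa using (List.mem_filter.mp h).2

-- B's concatenation is a permutation of the input
lemma buckets_perm (risks : List String) :
    (PySem.List.sorted (lvlFilter risks 0) (fun x => x) ++
     PySem.List.sorted (lvlFilter risks 1) (fun x => x) ++
     PySem.List.sorted (lvlFilter risks 2) (fun x => x) ++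
     PySem.List.sorted (lvlFilter risks 3) (fun x => x) ++
     PySem.List.sorted (lvlFilter risks 4) (fun x => x)).Perm risks := by
  apply List.perm_iff_count.mpr
  intro a
  have hc : ∀ i : Int, (PySem.List.sorted (lvlFilter risks i) (fun x => x)).count a
      = (lvlFilter risks i).count a :=
    fun i => (PySem.List.sorted_perm (lvlFilter risks i) (fun x => x) false).count_eq a
  have hf : ∀ i : Int, (lvlFilter risks i).count a =
      if riskLevelA a = i then risks.count a else 0 := by
    intro i
    unfold lvlFilter
    by_cases h : riskLevelA a = i
    · rw [if_pos h, List.count_filter (by simpa using h)]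
    · rw [if_neg h, List.count_eq_zero]
      intro hm
      exact h (by simpa using (List.mem_filter.mp hm).2)
  simp only [List.count_append, hc, hf]
  rcases riskLevelA_cases a with h | h | h | h | h <;> simp [h]

lemma encKey_le_of_same {a b : String} (h : riskLevelA a = riskLevelA b) (hab : a ≤ b) :
    encKey a ≤ encKey b := by
  unfold encKey
  rw [h]
  rcases eq_or_lt_of_le hab with rfl | hlt
  · exact le_refl _
  · exact le_of_lt (List.cons_lt_cons_iff.mpr (Or.inr ⟨rfl, String.lt_iff_toList_lt.mp hlt⟩))

lemma encKey_le_of_lt {a b : String} (h : riskLevelA a < riskLevelA b) :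
    encKey a ≤ encKey b := by
  unfold encKey
  apply le_of_lt
  apply List.cons_lt_cons_iff.mpr
  left
  rcases riskLevelA_cases a with ha | ha | ha | ha | ha <;>
    rcases riskLevelA_cases b with hb | hb | hb | hb | hb <;>
      simp [ha, hb] at h ⊢

lemma sorted_bucket_pairwise (risks : List String) (i : Int) :
    (PySem.List.sorted (lvlFilter risks i) (fun x => x)).Pairwise
      (fun a b => encKey a ≤ encKey b) := by
  have hp := PySem.List.sorted_pairwise (lvlFilter risks i) (fun x => x)
  refine List.Pairwise.imp_of_mem ?_ hp
  intro a b hma hmb hle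
  have ha := mem_lvlFilter ((PySem.List.mem_sorted _ _ _ a).mp hma)
  have hb := mem_lvlFilter ((PySem.List.mem_sorted _ _ _ b).mp hmb)
  exact encKey_le_of_same (ha.trans hb.symm) hle

lemma cross_bucket {risks : List String} {i j : Int} (hij : i < j) :
    ∀ a ∈ PySem.List.sorted (lvlFilter risks i) (fun x => x),
    ∀ b ∈ PySem.List.sorted (lvlFilter risks j) (fun x => x),
      encKey a ≤ encKey b := by
  intro a hma b hmb
  have ha := mem_lvlFilter ((PySem.List.mem_sorted _ _ _ a).mp hma)
  have hb := mem_lvlFilter ((PySem.List.mem_sorted _ _ _ b).mp hmb)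
  exact encKey_le_of_lt (by omega)

lemma buckets_pairwise (risks : List String) :
    (PySem.List.sorted (lvlFilter risks 0) (fun x => x) ++
     PySem.List.sorted (lvlFilter risks 1) (fun x => x) ++
     PySem.List.sorted (lvlFilter risks 2) (fun x => x) ++
     PySem.List.sorted (lvlFilter risks 3) (fun x => x) ++
     PySem.List.sorted (lvlFilter risks 4) (fun x => x)).Pairwise
      (fun a b => encKey a ≤ encKey b) := by
  simp only [List.pairwise_append]
  refine ⟨⟨⟨⟨sorted_bucket_pairwise risks 0, sorted_bucket_pairwise risks 1,
    cross_bucket (by omega)⟩, sorted_bucket_pairwise risks 2, ?_⟩,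
    sorted_bucket_pairwise risks 3, ?_⟩, sorted_bucket_pairwise risks 4, ?_⟩ <;>
  · intro a hma b hmb
    simp only [List.mem_append] at hma
    rcases hma with hma | hma <;> try rcases hma with hma | hma
    all_goals first
      | exact cross_bucket (by omega) a hma b hmb
      | (rcases hma with hma | hma <;> exact cross_bucket (by omega) a hma b hmb)

lemma sorted_encKey_of_perm (xs ys : List String)
    (hinj : Function.Injective encKey) (hp : xs.Perm ys) :
    PySem.List.sorted xs encKey = PySem.List.sorted ys encKey := by
  have h := PySem.List.sorted_eq_sorted_of_perm xs ys encKey hinj hp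
  convert h using 2

lemma sorted_encKey_eq_self (xs : List String)
    (hpw : List.Pairwise (fun a b => encKey a ≤ encKey b) xs) :
    PySem.List.sorted xs encKey = xs := by
  have h := PySem.List.sorted_eq_self_of_pairwise xs encKey hpw
  convert h using 2

-- ===== VERDICT (by name: the statement is the Claim_ definition above) =====
theorem sort_risks_py_spec : Claim_equal_sort_risks_py := by
  intro risks _
  unfold Spec_sort_risks_py sort_risks_py sort_risks_py_alt
  by_cases hnil : risks = []
  · simp [hnil]
  · rw [if_neg hnil, if_neg hnil]
    rw [sorted2_eq_sorted_encKey, fold_buckets]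
    simp only [List.nil_append]
    set ys := PySem.List.sorted (lvlFilter risks 0) (fun x => x) ++
      PySem.List.sorted (lvlFilter risks 1) (fun x => x) ++
      PySem.List.sorted (lvlFilter risks 2) (fun x => x) ++
      PySem.List.sorted (lvlFilter risks 3) (fun x => x) ++
      PySem.List.sorted (lvlFilter risks 4) (fun x => x) with hys
    have h1 : PySem.List.sorted risks encKey = PySem.List.sorted ys encKey :=
      sorted_encKey_of_perm _ _ encKey_inj (buckets_perm risks).symm
    have h2 : PySem.List.sorted ys encKey = ys :=
      sorted_encKey_eq_self _ (by rw [hys]; exact buckets_pairwise risks)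
    rw [h1, h2, hys]
    simp [lvlFilter, List.append_assoc]
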